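-- pv_equiv track=rewrite | github.com/bobbyhiddn/Tagger.md | tagger.py | find_last_front_matter_end
-- ===== SOURCE A (Python) =====
-- def find_last_front_matter_end(lines):
--     last_end = None
--     in_front_matter = False
--     for i, line in enumerate(lines):
--         stripped_line = line.strip()
--         if stripped_line == "---":
--             if in_front_matter:
--                 last_end = i
--             in_front_matter = not in_front_matter
--     return last_end
-- ===== SOURCE B (Python) =====
-- def find_last_front_matter_end(lines):
--     delims = [i for i, line in enumerate(lines) if line.strip() == "---"]
--     k = len(delims)
--     return delims[k - 1 - k % 2] if k >= 2 else None
-- ===== Notes on version B (the rewrite author's own statement) =====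
-- stated objective: simpler
-- what changed: Replaced A's stateful in_front_matter toggle and per-line conditional update with a single collection of all delimiter line indices followed by index arithmetic (k-1-k%2) selecting the last closing delimiter.
import Mathlib
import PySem

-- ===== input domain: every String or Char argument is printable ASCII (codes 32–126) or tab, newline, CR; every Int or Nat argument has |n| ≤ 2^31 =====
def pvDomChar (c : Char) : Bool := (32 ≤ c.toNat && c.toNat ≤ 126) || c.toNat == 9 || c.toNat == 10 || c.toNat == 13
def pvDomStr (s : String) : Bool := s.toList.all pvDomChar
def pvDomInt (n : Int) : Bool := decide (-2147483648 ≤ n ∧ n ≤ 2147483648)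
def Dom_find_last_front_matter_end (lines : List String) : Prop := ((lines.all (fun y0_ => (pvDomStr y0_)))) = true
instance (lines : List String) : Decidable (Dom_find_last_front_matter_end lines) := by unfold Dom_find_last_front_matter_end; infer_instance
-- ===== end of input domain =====

-- B replaces A's stateful in_front_matter toggle by collecting all delimiter indices once and
-- selecting the last odd-position one by index arithmetic (objective: simpler decomposition).

-- ===== PORT A =====
def find_last_front_matter_end (lines : List String) : Option Int :=
  ((PySem.List.enumerate lines 0).foldl
    (fun (st : Option Int × Bool) p =>
      if PySem.Str.strip p.2 = "---" then
        (if st.2 then some p.1 else st.1, !st.2)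
      else st)
    (none, false)).1

-- ===== PORT B =====
def find_last_front_matter_end_alt (lines : List String) : Option Int :=
  let delims : List Int := (PySem.List.enumerate lines 0).filterMap
    (fun p => if PySem.Str.strip p.2 = "---" then some p.1 else none)
  let k : Int := delims.length
  if 2 ≤ k then PySem.List.pyGet? delims (k - 1 - PySem.Int.mod k 2) else none

-- ===== PRECONDITION & SPEC =====
def Spec_find_last_front_matter_end (lines : List String) (out : Option Int) : Prop := out = find_last_front_matter_end_alt lines
instance (lines : List String) (out : Option Int) : Decidable (Spec_find_last_front_matter_end lines out) := by unfold Spec_find_last_front_matter_end; infer_instance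

-- ===== CLAIM (what is proved, stated in full; the proofs are below) =====
def Claim_equal_find_last_front_matter_end : Prop := ∀ (lines : List String), Dom_find_last_front_matter_end lines → Spec_find_last_front_matter_end lines (find_last_front_matter_end lines)

-- ===== LEMMAS AND PROOFS =====

-- the toggle step of A, restricted to the delimiter indices
def pvTStep (st : Option Int × Bool) (i : Int) : Option Int × Bool :=
  (if st.2 then some i else st.1, !st.2)

-- indices selected by the toggle: those at positions where the flag is set
def pvSel (f : Bool) : List Int → List Int
  | [] => []
  | i :: t => if f then i :: pvSel (!f) t else pvSel (!f) t

theorem pv_getLast?_cons_or {α : Type} (a : α) (t : List α) :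
    (a :: t).getLast? = t.getLast?.or (some a) := by
  cases t with
  | nil => simp
  | cons b t' =>
    rw [List.getLast?_cons_cons]
    have h : (b :: t').getLast? = some ((b :: t').getLast (by simp)) :=
      List.getLast?_eq_some_getLast _
    simp [h]

-- A's fold over all lines equals the toggle fold over just the delimiter indices
theorem pv_foldA (L : List (Int × String)) (st : Option Int × Bool) :
    L.foldl
      (fun (st : Option Int × Bool) p =>
        if PySem.Str.strip p.2 = "---" then
          (if st.2 then some p.1 else st.1, !st.2)
        else st) st
    = (L.filterMap (fun p => if PySem.Str.strip p.2 = "---" then some p.1 else none)).foldl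
        pvTStep st := by
  induction L generalizing st with
  | nil => simp
  | cons p L ih =>
    by_cases h : PySem.Str.strip p.2 = "---" <;>
      simp [List.foldl_cons, h, pvTStep, ih]

-- the toggle fold returns the last selected index, falling back to the accumulator
theorem pv_toggle (d : List Int) (l : Option Int) (f : Bool) :
    (d.foldl pvTStep (l, f)).1 = (pvSel f d).getLast?.or l := by
  induction d generalizing l f with
  | nil => simp [pvSel]
  | cons i t ih =>
    cases f with
    | true =>
      simp only [List.foldl_cons, pvTStep]
      rw [ih]
      simp only [pvSel, if_pos]
      rw [pv_getLast?_cons_or]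
      simp
    | false =>
      simp only [List.foldl_cons, pvTStep]
      rw [ih]
      simp [pvSel]

-- the last index selected from flag-off start is the element at position k-1-k%2 (k ≥ 2)
theorem pv_sel_last (d : List Int) :
    (pvSel false d).getLast? =
      if 2 ≤ d.length then d[(d.length - 1 - d.length % 2)]? else none := by
  induction d using List.twoStepInduction with
  | nil => simp [pvSel]
  | singleton a => simp [pvSel]
  | cons_cons a b t ih _ =>
    have hsel : pvSel false (a :: b :: t) = b :: pvSel false t := by
      simp [pvSel]
    rw [hsel, pv_getLast?_cons_or]
    match t, ih with
    | [], _ => simp [pvSel]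
    | [c], _ => simp [pvSel]
    | c :: e :: t', ih =>
      set u := c :: e :: t' with hu
      have hlen : 2 ≤ u.length := by simp [hu]
      have hidx : u.length - 1 - u.length % 2 < u.length := by omega
      rw [ih]
      simp only [hlen, if_pos]
      have hsome : u[(u.length - 1 - u.length % 2)]? = some u[(u.length - 1 - u.length % 2)] :=
        List.getElem?_eq_getElem hidx
      have hlen2 : 2 ≤ (a :: b :: u).length := by simp
      rw [if_pos hlen2]
      have harith : (a :: b :: u).length - 1 - (a :: b :: u).length % 2
          = ((u.length - 1 - u.length % 2) + 1) + 1 := by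
        simp only [List.length_cons]
        omega
      rw [harith, List.getElem?_cons_succ, List.getElem?_cons_succ, hsome]
      simp

-- ===== VERDICT (by name: the statement is the Claim_ definition above) =====
theorem find_last_front_matter_end_spec : Claim_equal_find_last_front_matter_end := by
  intro lines _
  unfold Spec_find_last_front_matter_end find_last_front_matter_end find_last_front_matter_end_alt
  rw [pv_foldA, pv_toggle, pv_sel_last]
  set d := (PySem.List.enumerate lines 0).filterMap
    (fun p => if PySem.Str.strip p.2 = "---" then some p.1 else none) with hd
  by_cases h : 2 ≤ d.length
  · have hInt : (2 : Int) ≤ (d.length : Int) := by exact_mod_cast h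
    rw [if_pos h, if_pos hInt]
    have hmod : PySem.Int.mod (d.length : Int) 2 = ((d.length % 2 : Nat) : Int) := by
      exact_mod_cast PySem.Int.mod_natCast d.length 2
    have hidx : (d.length : Int) - 1 - PySem.Int.mod (d.length : Int) 2
        = ((d.length - 1 - d.length % 2 : Nat) : Int) := by
      rw [hmod]
      have := Nat.mod_lt d.length (show 0 < 2 by norm_num)
      push_cast
      omega
    rw [hidx, PySem.List.pyGet?_natCast]
    simp
  · have hInt : ¬ (2 : Int) ≤ (d.length : Int) := by exact_mod_cast h
    rw [if_neg h, if_neg hInt]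
    simp
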